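-- pv_equiv track=rewrite | github.com/ThibaudVanmechelen/HistoSAM | src/dataset_processing/merge_dataset.py | get_img_per_slide_count
-- ===== SOURCE A (Python) =====
-- from typing import List
--
-- def get_img_per_slide_count(dataset_files : List[str]) -> int:
--     """Return the number of img per slide in a dataset.
--     Basically, count the number of folder {i}_{a} from annotation_wise_scraper
--     for all possible i."""
--     img_per_slide_count = {}
--
--     for file_path in dataset_files:
--         file_name = file_path.split('/')[-1]
--         img, _ = file_name.split('_')
--
--         if img not in img_per_slide_count:
--             img_per_slide_count[img] = 0
--
--         img_per_slide_count[img] += 1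
--
--     return img_per_slide_count
-- ===== SOURCE B (Python) =====
-- def get_img_per_slide_count(dataset_files):
--     """Recursive partition-based counting: extract the slide prefixes, then
--     repeatedly take the first prefix, count its group by removing all its
--     occurrences, and recurse on the remainder."""
--     prefixes = []
--     for file_path in dataset_files:
--         file_name = file_path.split('/')[-1]
--         img, _ = file_name.split('_')
--         prefixes.append(img)
--
--     def group_counts(ps):
--         if not ps:
--             return {}
--         head = ps[0]
--         rest = [p for p in ps if p != head]
--         result = {head: len(ps) - len(rest)}
--         result.update(group_counts(rest))
--         return result
--
--     return group_counts(prefixes)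
-- ===== Notes on version B (the rewrite author's own statement) =====
-- stated objective: alternative
-- what changed: Replaces A's single-pass incremental dict counter by a two-stage pipeline: collect the slide prefixes, then a recursive partition that takes the first prefix, counts its group as the length drop when all its occurrences are filtered out, and recurses on the remainder.
import Mathlib
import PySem

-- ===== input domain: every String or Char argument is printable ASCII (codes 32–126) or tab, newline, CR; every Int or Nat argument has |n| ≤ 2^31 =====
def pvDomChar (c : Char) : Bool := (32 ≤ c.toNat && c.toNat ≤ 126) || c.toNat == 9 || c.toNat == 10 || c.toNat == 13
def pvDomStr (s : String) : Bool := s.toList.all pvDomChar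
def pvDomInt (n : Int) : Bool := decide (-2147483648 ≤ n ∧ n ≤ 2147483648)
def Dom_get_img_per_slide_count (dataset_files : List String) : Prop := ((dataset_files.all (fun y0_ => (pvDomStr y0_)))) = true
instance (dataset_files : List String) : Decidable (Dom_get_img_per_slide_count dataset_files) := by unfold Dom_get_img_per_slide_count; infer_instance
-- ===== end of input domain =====

-- B replaces A's incremental dict-counting loop by a recursive partition: take the first
-- prefix, count its group by removing all its occurrences, recurse on the remainder.

-- shared helper: file_path.split('/')[-1] then 'img, _ = file_name.split('_')';
-- returns none exactly where the Python unpacking raises ValueError (excluded by Pre_)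
def pvExtract (s : String) : Option String :=
  match (PySem.Str.split? ((PySem.List.pyGet? ((PySem.Str.split? s "/").getD []) (-1)).getD "") "_").getD [] with
  | [img, _] => some img
  | _ => none

-- ===== PORT A =====
def get_img_per_slide_count (dataset_files : List String) : List (String × Int) :=
  (dataset_files.foldl (fun d file_path =>
      match pvExtract file_path with
      | some img =>
        let d' := if d.contains img then d else d.insert img 0
        d'.insert img (d'.getD img 0 + 1)
      | none => d) PySem.Dict.empty).items

-- ===== PORT B =====
-- group_counts: head's group counted by filtering it out, then recursion on the remainder
def pvGroupCounts : List String → List (String × Int)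
  | [] => []
  | h :: t =>
    let rest := (h :: t).filter (fun p => p != h)
    (h, ((h :: t).length : Int) - rest.length) :: pvGroupCounts rest
termination_by ps => ps.length
decreasing_by
  simp only [List.filter_cons, bne_self_eq_false, Bool.false_eq_true, if_false, List.length_cons]
  have := List.length_filter_le (fun p => p != h) t
  omega

def get_img_per_slide_count_alt (dataset_files : List String) : List (String × Int) :=
  pvGroupCounts (dataset_files.foldl (fun acc file_path =>
    match pvExtract file_path with
    | some img => acc ++ [img]
    | none => acc) [])

-- ===== PRECONDITION & SPEC =====
-- Pre_ excludes exactly the inputs where some file's last '/'-segment does not split on '_'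
-- into exactly two parts, on which the Python unpacking 'img, _ = …' raises ValueError.
def Pre_get_img_per_slide_count (dataset_files : List String) : Prop :=
  ∀ f ∈ dataset_files,
    ((PySem.Str.split? ((PySem.List.pyGet? ((PySem.Str.split? f "/").getD []) (-1)).getD "") "_").getD []).length = 2
instance (dataset_files : List String) : Decidable (Pre_get_img_per_slide_count dataset_files) := by
  unfold Pre_get_img_per_slide_count; infer_instance
def pvWitness_get_img_per_slide_count : List String := ["dir/1_0.png", "2_1.png", "dir/1_2.png"]

def Spec_get_img_per_slide_count (dataset_files : List String) (out : List (String × Int)) : Prop := out = get_img_per_slide_count_alt dataset_files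
instance (dataset_files : List String) (out : List (String × Int)) : Decidable (Spec_get_img_per_slide_count dataset_files out) := by unfold Spec_get_img_per_slide_count; infer_instance

-- ===== CLAIM (what is proved, stated in full; the proofs are below) =====
def Claim_equal_get_img_per_slide_count : Prop := ∀ (dataset_files : List String), Dom_get_img_per_slide_count dataset_files → Pre_get_img_per_slide_count dataset_files → Spec_get_img_per_slide_count dataset_files (get_img_per_slide_count dataset_files)

-- ===== LEMMAS AND PROOFS =====

-- A's two-step update (ensure key, then += 1) is one counting insert
theorem pv_step_eq (d : PySem.Dict String Int) (img : String) :
    ((if d.contains img then d else d.insert img 0).insert img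
      ((if d.contains img then d else d.insert img 0).getD img 0 + 1))
      = d.insert img (d.getD img 0 + 1) := by
  by_cases h : d.contains img = true
  · simp [h]
  · simp only [Bool.not_eq_true] at h
    have h0 : d.getD img 0 = 0 := PySem.Dict.getD_of_not_contains d 0 h
    simp [h, PySem.Dict.getD_insert_self, PySem.Dict.insert_insert_self, h0]

-- A's fold over the files is the counting fold over the extracted prefixes
theorem pv_fold_eq (fs : List String) (d : PySem.Dict String Int) :
    fs.foldl (fun d file_path =>
      match pvExtract file_path with
      | some img =>
        let d' := if d.contains img then d else d.insert img 0
        d'.insert img (d'.getD img 0 + 1)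
      | none => d) d
    = (fs.filterMap pvExtract).foldl (fun d x => d.insert x (d.getD x 0 + 1)) d := by
  have hf : (fun (d : PySem.Dict String Int) (file_path : String) =>
      match pvExtract file_path with
      | some img =>
        let d' := if d.contains img then d else d.insert img 0
        d'.insert img (d'.getD img 0 + 1)
      | none => d)
      = (fun d file_path =>
        match pvExtract file_path with
        | some img => d.insert img (d.getD img 0 + 1)
        | none => d) := by
    funext d f
    cases h : pvExtract f
    · simp
    · simp [pv_step_eq]
  rw [hf]
  induction fs generalizing d with
  | nil => rfl
  | cons f fs ih =>
    cases h : pvExtract f with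
    | none => simp only [List.foldl_cons, List.filterMap_cons, h]; exact ih d
    | some img =>
      simp only [List.foldl_cons, List.filterMap_cons, h]
      exact ih _

-- B's append loop collects exactly the extracted prefixes
theorem pv_collect_eq (fs : List String) (acc : List String) :
    fs.foldl (fun acc file_path =>
      match pvExtract file_path with
      | some img => acc ++ [img]
      | none => acc) acc = acc ++ fs.filterMap pvExtract := by
  induction fs generalizing acc with
  | nil => simp
  | cons f fs ih =>
    cases h : pvExtract f with
    | none => simp [h, ih]
    | some img => simp [h, ih]

-- adding elements ≠ a to a set commutes with a leading a
theorem pv_foldl_add_cons (a : String) (l s : List String) (hl : ∀ x ∈ l, x ≠ a) :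
    l.foldl PySem.Set.add (a :: s) = a :: l.foldl PySem.Set.add s := by
  induction l generalizing s with
  | nil => rfl
  | cons p l ih =>
    have hp : p ≠ a := hl p (by simp)
    have hrest : ∀ x ∈ l, x ≠ a := fun x hx => hl x (by simp [hx])
    simp only [List.foldl_cons]
    have hadd : PySem.Set.add (a :: s) p = a :: PySem.Set.add s p := by
      simp [PySem.Set.add, hp]
      split <;> simp_all
    rw [hadd, ih _ hrest]

-- once a is in the set, occurrences of a in the remaining input are no-ops
theorem pv_foldl_add_filter (a : String) (l s : List String) (ha : a ∈ s) :
    l.foldl PySem.Set.add s = (l.filter (fun p => p != a)).foldl PySem.Set.add s := by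
  induction l generalizing s with
  | nil => rfl
  | cons p l ih =>
    by_cases hp : p = a
    · subst hp
      have hs : PySem.Set.add s p = s := by simp [PySem.Set.add]; exact ha
      simp only [List.filter_cons, bne_self_eq_false, Bool.false_eq_true, if_false,
        List.foldl_cons, hs]
      exact ih s ha
    · have : a ∈ PySem.Set.add s p := by
        simp [PySem.Set.add]; split <;> simp [ha]
      simp only [List.filter_cons, List.foldl_cons, bne_iff_ne, ne_eq, hp, not_false_iff,
        if_pos]
      exact ih _ this

-- first-occurrence dedup of h :: t = h :: dedup of t with h's removed
theorem pv_ofList_cons (h : String) (t : List String) :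
    PySem.Set.ofList (h :: t) = h :: PySem.Set.ofList (t.filter (fun p => p != h)) := by
  rw [PySem.Set.ofList_eq_foldl, PySem.Set.ofList_eq_foldl]
  simp only [List.foldl_cons]
  have h1 : PySem.Set.add [] h = [h] := rfl
  rw [h1, pv_foldl_add_filter h t [h] (by simp)]
  exact pv_foldl_add_cons h _ [] (by intro x hx; simpa using (List.of_mem_filter hx))

-- the head's group size: length minus survivors = count of the head
theorem pv_count_head (h : String) (t : List String) :
    (((h :: t).length : Int)) - ((t.filter (fun p => p != h)).length : Int)
      = (((h :: t).count h : Nat) : Int) := by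
  have h2 := List.length_eq_countP_add_countP (p := fun p => p != h) (l := h :: t)
  have h3 : List.countP (fun a => decide ¬((fun p => p != h) a) = true) (h :: t)
      = (h :: t).count h := by
    rw [List.count]
    apply List.countP_congr
    intro x _
    simp
  have h4 : List.countP (fun p => p != h) (h :: t) = (t.filter (fun p => p != h)).length := by
    rw [List.countP_eq_length_filter]
    simp
  rw [h3, h4] at h2
  omega

-- B's recursive grouping computes Counter-as-items over first occurrences
theorem pv_group_eq (ps : List String) :
    pvGroupCounts ps = (PySem.Set.ofList ps).map (fun k => (k, (ps.count k : Int))) := by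
  induction hn : ps.length using Nat.strong_induction_on generalizing ps with
  | _ n ih =>
    match ps with
    | [] => simp [pvGroupCounts]
    | h :: t =>
      rw [pvGroupCounts, pv_ofList_cons]
      simp only [List.map_cons, List.filter_cons, bne_self_eq_false, Bool.false_eq_true,
        if_false]
      have hlen : (t.filter (fun p => p != h)).length < n := by
        subst hn
        exact Nat.lt_succ_of_le (List.length_filter_le _ t)
      rw [List.cons_eq_cons]
      refine ⟨?_, ?_⟩
      · exact congrArg (Prod.mk h) (pv_count_head h t)
      · rw [ih _ hlen _ rfl]
        apply List.map_congr_left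
        intro k hk
        have hk' : k ∈ t.filter (fun p => p != h) :=
          (PySem.Set.mem_ofList (y := k) (xs := t.filter (fun p => p != h))).mp hk
        have hkh : k ≠ h := by simpa using (List.of_mem_filter hk')
        have hc : (t.filter (fun p => p != h)).count k = (h :: t).count k := by
          rw [List.count_filter (by simp [hkh])]
          rw [List.count_cons]
          simp [Ne.symm hkh]
        rw [hc]

-- ===== VERDICT (by name: the statement is the Claim_ definition above) =====
theorem get_img_per_slide_count_spec : Claim_equal_get_img_per_slide_count := by
  intro fs _ _
  unfold Spec_get_img_per_slide_count get_img_per_slide_count get_img_per_slide_count_alt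
  rw [pv_fold_eq, PySem.Dict.foldl_insert_getD_add_one_eq_counter, PySem.Dict.items_counter,
    pv_collect_eq, List.nil_append, pv_group_eq]
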